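-- pv_equiv track=rewrite | github.com/MahdiBaghbani/Python-Encryption | source/lib/FrequencyAnalyzer.py | get_word_frequency_order
-- ===== SOURCE A (Python) =====
-- import operator
-- from collections import defaultdict
--
-- def get_word_frequency_order(string: str, length: str) -> dict:
--     """
--     This function will return a dictionary containing a list most frequent words by length
--
--     :param string: string text to be analyzed
--     :param length: desired length
--     :return: dictionary with length as keys and values a list containing words ordered by their frequency
--     """
--     # check inputs
--     if not (type(string) == str and type(length) == str):
--         raise TypeError("Arguments 'string' and 'length' of this function must be of type string.\n")
--
--     # split string into words
--     word_list = string.split()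
--     # create output dictionary
--     frequency_order = defaultdict(list)
--
--     # get frequency order of words with lengths 1 to 4
--     if length == 'all':
--         for i in range(1, 5):
--             frequency_order[str(i)] = get_word_order(word_list, i)
--     # get frequency of arbitrary length of words
--     else:
--         # convert length from string to integer
--         try:
--             int_length = int(length)
--         except ValueError:
--             raise ValueError("Length argument must be an integer in type of string! example: '3'.\n")
--         else:
--             frequency_order[length] = get_word_order(word_list, int_length)
--     # convert default dictionary to dictionary and return it
--     return dict(frequency_order)
--
-- def get_word_order(word_list: list, length: int) -> list:
--     """
--     This function will return a frequency ordered list of words with specific length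
--
--     :param word_list: list of words
--     :param length: length of target words
--     :return: frequency ordered list of words with specific length
--     """
--
--     # check inputs
--     if not type(word_list) == list:
--         raise TypeError("Argument 'word_list' of this function must be of type list.\n")
--     if not type(length) == int:
--         raise TypeError("Argument 'length' of this function must be of type integer.\n")
--
--     # create a default dict with values of type int
--     dictionary = defaultdict(int)
--     # for word in word_list if the words length is the one we are searching for,
--     # add the word as key to dictionary and add 1 to in's value as counter
--     for i in word_list:
--         if len(i) == length:
--             dictionary[i] += 1
--     # convert default dict to dict
--     dictionary = dict(dictionary)
--     # sort all words in dictionary based on their counters, reverse true means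
--     # the words with higher counter numbers will be at start of list
--     dictionary = sorted(dictionary.items(), key=operator.itemgetter(1), reverse=True)
--     # return frequency ordered words in a list
--     return [get_item_at_index_zero(i) for i in dictionary]
--
-- def get_item_at_index_zero(x):
--     """ Returns item at index zero """
--     return x[0]
-- ===== SOURCE B (Python) =====
-- def get_word_frequency_order(string: str, length: str) -> dict:
--     if not (type(string) == str and type(length) == str):
--         raise TypeError("Arguments 'string' and 'length' of this function must be of type string.\n")
--     # one pass: group words by length into per-length count maps (first-occurrence order)
--     index = {}
--     for w in string.split():
--         bucket = index.setdefault(len(w), {})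
--         bucket[w] = bucket.get(w, 0) + 1
--
--     def extract(n):
--         bucket = index.get(n, {})
--         return [w for w, _ in sorted(bucket.items(), key=lambda p: p[1], reverse=True)]
--
--     if length == 'all':
--         return {str(i): extract(i) for i in range(1, 5)}
--     try:
--         n = int(length)
--     except ValueError:
--         raise ValueError("Length argument must be an integer in type of string! example: '3'.\n")
--     return {length: extract(n)}
-- ===== Notes on version B (the rewrite author's own statement) =====
-- stated objective: alternative
-- what changed: B groups all words by length into an index of ordered count maps in a single pass and extracts each requested length from that index, instead of A's per-length rescans of the whole word list; the else-branch ValueError inputs (length neither 'all' nor int-parseable) are outside Pre_ since both raise there.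
import Mathlib
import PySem

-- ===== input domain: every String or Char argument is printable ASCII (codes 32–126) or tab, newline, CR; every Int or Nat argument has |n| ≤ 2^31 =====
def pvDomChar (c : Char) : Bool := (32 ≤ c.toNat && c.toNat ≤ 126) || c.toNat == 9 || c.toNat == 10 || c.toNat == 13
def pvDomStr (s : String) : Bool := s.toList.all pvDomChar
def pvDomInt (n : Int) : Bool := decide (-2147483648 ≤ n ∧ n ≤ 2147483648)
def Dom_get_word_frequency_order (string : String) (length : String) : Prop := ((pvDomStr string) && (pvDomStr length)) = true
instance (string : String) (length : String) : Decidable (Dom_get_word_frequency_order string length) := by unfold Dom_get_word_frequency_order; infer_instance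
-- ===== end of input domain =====

-- B builds, in one pass, an index from word length to an ordered count map and extracts each
-- requested length from it, instead of re-scanning the word list once per length (objective: alternative decomposition).


-- ===== PORT A =====
def pv_get_item_at_index_zero (x : String × Int) : String := x.1

def pv_get_word_order (word_list : List String) (length : Int) : List String :=
  let dictionary : PySem.Dict String Int :=
    word_list.foldl (fun d i => if PySem.Str.len i = length then d.modify i 0 (· + 1) else d)
      PySem.Dict.empty
  let sortedItems := PySem.List.sorted dictionary.items (fun p => p.2) true
  sortedItems.map pv_get_item_at_index_zero

def get_word_frequency_order (string : String) (length : String) : List (String × List String) :=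
  let word_list := PySem.Str.split₀ string
  if length = "all" then
    ((PySem.List.pyRange 1 5 1).foldl
      (fun fo i => fo.insert (PySem.Int.toStr i) (pv_get_word_order word_list i))
      (PySem.Dict.empty : PySem.Dict String (List String))).items
  else
    match PySem.Int.ofStr? length with
    | none => []   -- Python raises ValueError here; excluded by Pre_
    | some int_length =>
      ((PySem.Dict.empty : PySem.Dict String (List String)).insert length
        (pv_get_word_order word_list int_length)).items

-- ===== PORT B =====
def pvIndex (words : List String) : PySem.Dict Int (PySem.Dict String Int) :=
  words.foldl
    (fun idx w => idx.modify (PySem.Str.len w) PySem.Dict.empty (fun b => b.modify w 0 (· + 1)))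
    PySem.Dict.empty

def pvExtract (idx : PySem.Dict Int (PySem.Dict String Int)) (n : Int) : List String :=
  (PySem.List.sorted (idx.getD n PySem.Dict.empty).items (fun p => p.2) true).map (·.1)

def get_word_frequency_order_alt (string : String) (length : String) : List (String × List String) :=
  let idx := pvIndex (PySem.Str.split₀ string)
  if length = "all" then
    (PySem.List.pyRange 1 5 1).map (fun i => (PySem.Int.toStr i, pvExtract idx i))
  else
    match PySem.Int.ofStr? length with
    | none => []   -- ValueError in Python B as well; excluded by Pre_
    | some n => [(length, pvExtract idx n)]

-- ===== PRECONDITION & SPEC =====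
-- Pre_ excludes exactly the inputs where Python A raises ValueError: length neither 'all' nor parseable by int().
def Pre_get_word_frequency_order (string : String) (length : String) : Prop :=
  length = "all" ∨ (PySem.Int.ofStr? length).isSome = true
instance (string : String) (length : String) : Decidable (Pre_get_word_frequency_order string length) := by
  unfold Pre_get_word_frequency_order; infer_instance

def pvWitness_get_word_frequency_order : String × String := ("a bb a ccc bb", "all")

def Spec_get_word_frequency_order (string : String) (length : String) (out : List (String × List String)) : Prop := out = get_word_frequency_order_alt string length
instance (string : String) (length : String) (out : List (String × List String)) : Decidable (Spec_get_word_frequency_order string length out) := by unfold Spec_get_word_frequency_order; infer_instance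

-- ===== CLAIM (what is proved, stated in full; the proofs are below) =====
def Claim_equal_get_word_frequency_order : Prop := ∀ (string : String) (length : String), Dom_get_word_frequency_order string length → Pre_get_word_frequency_order string length → Spec_get_word_frequency_order string length (get_word_frequency_order string length)

-- ===== LEMMAS AND PROOFS =====

-- B's per-length bucket of the one-pass index is A's filtered counter.
theorem pvIndex_getD (words : List String) (n : Int) (idx : PySem.Dict Int (PySem.Dict String Int)) :
    (words.foldl
      (fun idx w => idx.modify (PySem.Str.len w) PySem.Dict.empty (fun b => b.modify w 0 (· + 1)))
      idx).getD n PySem.Dict.empty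
    = (words.filter (fun w => decide (PySem.Str.len w = n))).foldl
        (fun b w => b.modify w 0 (· + 1)) (idx.getD n PySem.Dict.empty) := by
  induction words generalizing idx with
  | nil => rfl
  | cons w ws ih =>
    simp only [List.foldl_cons, List.filter_cons, ih, PySem.Dict.getD_modify]
    by_cases h : PySem.Str.len w = n
    · have h' : (↑(String.length w) : Int) = n := by simpa [PySem.Str.len] using h
      simp [h', PySem.Str.len]
    · have h' : ¬((↑(String.length w) : Int) = n) := by simpa [PySem.Str.len] using h
      simp [h', Ne.symm h', PySem.Str.len]

theorem pvExtract_eq (words : List String) (n : Int) :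
    pvExtract (pvIndex words) n = pv_get_word_order words n := by
  unfold pvExtract pvIndex pv_get_word_order pv_get_item_at_index_zero
  rw [pvIndex_getD, PySem.List.foldl_ite_eq_foldl_filter]
  rfl

-- ===== VERDICT (by name: the statement is the Claim_ definition above) =====
theorem get_word_frequency_order_spec : Claim_equal_get_word_frequency_order := by
  intro string length _ hpre
  unfold Spec_get_word_frequency_order get_word_frequency_order get_word_frequency_order_alt
  by_cases hall : length = "all"
  · subst hall
    rw [if_pos rfl, if_pos rfl,
      PySem.Dict.items_foldl_insert_fresh (l := PySem.List.pyRange 1 5 1)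
        (k := PySem.Int.toStr)
        (v := fun i => pv_get_word_order (PySem.Str.split₀ string) i)
        (d := PySem.Dict.empty) (by decide) (by decide)]
    simp [pvExtract_eq, PySem.Dict.empty]
  · simp only [if_neg hall]
    rcases hpre with h | h
    · exact absurd h hall
    · rcases Option.isSome_iff_exists.mp h with ⟨n, hn⟩
      rw [hn]
      simp [PySem.Dict.insert, PySem.Dict.empty, PySem.Dict.contains,
        pvExtract_eq]
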